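-- pv_equiv track=rewrite | github.com/Zendard/MMM-tools | markov.py | table_to_lists
-- ===== SOURCE A (Python) =====
-- def table_to_lists(table):
--     lists = []
--     rows = get_row_headers(table)
--     columns = get_column_headers(table)
--
--     for row in rows:
--         row_list = []
--         for column in columns:
--             if (row, column) in table:
--                 row_list.append(table[(row, column)])
--             else:
--                 row_list.append(0)
--
--         lists.append(row_list)
--     return lists
--
-- def get_column_headers(table):
--     headers = set()
--     for pos in table.keys():
--         headers.add(pos[1])
--     return sorted(list(headers))
--
-- def get_row_headers(table):
--     headers = set()
--     for pos in table.keys():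
--         headers.add(pos[0])
--     return sorted(list(headers))
-- ===== SOURCE B (Python) =====
-- def table_to_lists(table):
--     rows = get_row_headers(table)
--     columns = get_column_headers(table)
--     position_index = {(r, c): (i, j) for i, r in enumerate(rows) for j, c in enumerate(columns)}
--     grid = [[0] * len(columns) for _ in rows]
--     for pos, value in table.items():
--         ij = position_index.get(pos)
--         if ij is not None:
--             grid[ij[0]][ij[1]] = value
--     return grid
--
-- def get_column_headers(table):
--     headers = set()
--     for pos in table.keys():
--         headers.add(pos[1])
--     return sorted(list(headers))
--
-- def get_row_headers(table):
--     headers = set()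
--     for pos in table.keys():
--         headers.add(pos[0])
--     return sorted(list(headers))
-- ===== Notes on version B (the rewrite author's own statement) =====
-- stated objective: alternative
-- what changed: A fills the grid cell by cell, testing membership and looking up the dict for every (row, column) pair; B precomputes a position->coordinates map, pre-allocates a zero grid with fresh inner lists, and scatters the dict's entries into the grid in one pass (entries that name no grid position are skipped). Pre_ excludes keys shorter than 2, on which A raises IndexError in the header helpers, and duplicate keys, which no Python dict can contain.
import Mathlib
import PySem

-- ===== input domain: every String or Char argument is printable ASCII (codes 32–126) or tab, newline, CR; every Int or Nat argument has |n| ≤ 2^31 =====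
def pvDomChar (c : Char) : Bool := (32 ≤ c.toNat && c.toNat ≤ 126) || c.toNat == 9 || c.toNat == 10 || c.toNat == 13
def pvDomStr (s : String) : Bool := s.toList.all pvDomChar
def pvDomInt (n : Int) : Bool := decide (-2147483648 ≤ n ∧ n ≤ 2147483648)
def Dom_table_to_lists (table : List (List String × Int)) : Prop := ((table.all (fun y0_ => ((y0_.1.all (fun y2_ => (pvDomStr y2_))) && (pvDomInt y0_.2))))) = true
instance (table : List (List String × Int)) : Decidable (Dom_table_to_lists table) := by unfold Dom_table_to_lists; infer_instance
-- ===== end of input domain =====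

-- B replaces A's per-cell membership test + dict lookup with a precomputed position->coordinates
-- map and a single scatter pass over the dict's entries into a pre-allocated zero grid
-- (objective: alternative — a genuinely different traversal, over the entries instead of the cells).

-- ===== PORT A =====
-- helper get_row_headers / get_column_headers (shared verbatim by A and B in Python):
-- 'pos[0]' / 'pos[1]' is PySem.List.pyGet?; the .getD "" default is unreachable under
-- Pre_table_to_lists (every key has length 2, so the index is in range).
def pvGetRowHeaders (table : List (List String × Int)) : List String :=
  PySem.List.sorted
    ((PySem.Dict.mk table).keys.foldl
      (fun headers pos => PySem.Set.add headers ((PySem.List.pyGet? pos 0).getD ""))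
      PySem.Set.empty)
    (fun x => x) false

def pvGetColumnHeaders (table : List (List String × Int)) : List String :=
  PySem.List.sorted
    ((PySem.Dict.mk table).keys.foldl
      (fun headers pos => PySem.Set.add headers ((PySem.List.pyGet? pos 1).getD ""))
      PySem.Set.empty)
    (fun x => x) false

def table_to_lists (table : List (List String × Int)) : List (List Int) :=
  let d := PySem.Dict.mk table
  let rows := pvGetRowHeaders table
  let columns := pvGetColumnHeaders table
  rows.foldl (fun lists row =>
    lists ++ [columns.foldl (fun row_list column =>
      if d.contains [row, column] then row_list ++ [(d.get? [row, column]).getD 0]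
      else row_list ++ [0]) []]) []

-- ===== PORT B =====
-- {(r, c): (i, j) for i, r in enumerate(rows) for j, c in enumerate(columns)}
def pvPosIndex (rows cols : List String) : PySem.Dict (List String) (Int × Int) :=
  (PySem.List.enumerate rows).foldl (fun d ir =>
    (PySem.List.enumerate cols).foldl (fun d jc => d.insert [ir.2, jc.2] (ir.1, jc.1)) d)
    PySem.Dict.empty

-- grid[i][j] = v; the indices come from enumerate so they are >= 0 and in range
-- (toNat/set/modify are then exact: Python raises only out of range).
def pvSetCell (grid : List (List Int)) (i j : Int) (v : Int) : List (List Int) :=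
  grid.modify i.toNat (fun r => r.set j.toNat v)

def table_to_lists_alt (table : List (List String × Int)) : List (List Int) :=
  let rows := pvGetRowHeaders table
  let columns := pvGetColumnHeaders table
  let positionIndex := pvPosIndex rows columns
  let grid := rows.map (fun _ => List.replicate columns.length (0 : Int))
  table.foldl (fun grid p =>
    match positionIndex.get? p.1 with   -- ij = position_index.get(pos)
    | some ij => pvSetCell grid ij.1 ij.2 p.2
    | none => grid) grid

-- ===== PRECONDITION & SPEC =====
-- Pre_ excludes (a) keys shorter than 2, on which A raises IndexError (pos[1] in the header
-- helpers), and (b) duplicate keys, which no Python dict can contain (the association list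
-- would not represent any dict, and first-match lookup vs last-write scatter would disagree).
def Pre_table_to_lists (table : List (List String × Int)) : Prop :=
  (table.map (fun p => p.1)).Nodup ∧ ∀ p ∈ table, 2 ≤ p.1.length
instance (table : List (List String × Int)) : Decidable (Pre_table_to_lists table) := by
  unfold Pre_table_to_lists; infer_instance

def pvWitness_table_to_lists : (List (List String × Int)) := [(["a", "x"], 3), (["b", "y"], 4)]

def Spec_table_to_lists (table : List (List String × Int)) (out : List (List Int)) : Prop := out = table_to_lists_alt table
instance (table : List (List String × Int)) (out : List (List Int)) : Decidable (Spec_table_to_lists table out) := by unfold Spec_table_to_lists; infer_instance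

-- ===== CLAIM (what is proved, stated in full; the proofs are below) =====
def Claim_equal_table_to_lists : Prop := ∀ (table : List (List String × Int)), Dom_table_to_lists table → Pre_table_to_lists table → Spec_table_to_lists table (table_to_lists table)

-- ===== LEMMAS AND PROOFS =====

-- the cell accessor used by the invariant (total, getD-based)
def pvCell (g : List (List Int)) (i j : Nat) : Int := (g[i]?.getD []).getD j 0

-- one write preserves the grid shape
lemma pvSetCell_shape (g : List (List Int)) (a b v : Int) :
    (pvSetCell g a b v).length = g.length ∧
    ∀ (k : Nat), ((pvSetCell g a b v)[k]?.getD []).length = (g[k]?.getD []).length := by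
  refine ⟨by simp [pvSetCell, List.length_modify], fun k => ?_⟩
  simp only [pvSetCell, List.getElem?_modify]
  cases h : g[k]? with
  | none => rfl
  | some r =>
    simp only [Option.map_eq_map, Option.map_some, Option.getD_some]
    split <;> simp [List.length_set]


-- A computes row-by-row the dict lookup with default 0
lemma pvA_eq_map (table : List (List String × Int)) :
    table_to_lists table =
      (pvGetRowHeaders table).map (fun row => (pvGetColumnHeaders table).map
        (fun column => ((PySem.Dict.mk table).get? [row, column]).getD 0)) := by
  unfold table_to_lists
  have hcell : ∀ (d : PySem.Dict (List String) Int) (k : List String),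
      (if d.contains k then ((d.get? k).getD 0 : Int) else 0) = (d.get? k).getD 0 := by
    intro d k
    rw [PySem.Dict.contains_eq_isSome_get?]
    cases d.get? k <;> simp
  have hinner : ∀ (d : PySem.Dict (List String) Int) (cols : List String) (row : String),
      cols.foldl (fun row_list column =>
        if d.contains [row, column] then row_list ++ [(d.get? [row, column]).getD 0]
        else row_list ++ [0]) []
      = cols.map (fun column => (d.get? [row, column]).getD 0) := by
    intro d cols row
    have h1 : (fun (row_list : List Int) column =>
        if d.contains [row, column] then row_list ++ [(d.get? [row, column]).getD 0]
        else row_list ++ [0])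
        = fun row_list column => row_list ++ [if d.contains [row, column] then (d.get? [row, column]).getD 0 else 0] := by
      funext rl c; split <;> rfl
    rw [h1, PySem.List.foldl_append_singleton_eq_map]
    simp only [List.nil_append]
    exact List.map_congr_left (fun c _ => hcell _ _)
  simp only [hinner, PySem.List.foldl_append_singleton_eq_map, List.nil_append]

-- lookups in the nested position-index fold: untouched keys pass through
lemma pvInner_preserve (l2 : List (Int × String)) (d : PySem.Dict (List String) (Int × Int))
    (i : Int) (r : String) (k : List String)
    (hk : ∀ jc ∈ l2, k ≠ [r, jc.2]) :
    (l2.foldl (fun d jc => d.insert [r, jc.2] (i, jc.1)) d).get? k = d.get? k := by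
  induction l2 generalizing d with
  | nil => rfl
  | cons a tl ih =>
    rw [List.foldl_cons, ih _ (fun jc h => hk jc (List.mem_cons_of_mem _ h)),
      PySem.Dict.get?_insert_of_ne _ _ (hk a List.mem_cons_self)]

lemma pvInner_get (l2 : List (Int × String)) (d : PySem.Dict (List String) (Int × Int))
    (i : Int) (r : String)
    (hnd : (l2.map (fun p => p.2)).Nodup) (jc : Int × String) (hjc : jc ∈ l2) :
    (l2.foldl (fun d jc => d.insert [r, jc.2] (i, jc.1)) d).get? [r, jc.2] = some (i, jc.1) := by
  induction l2 generalizing d with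
  | nil => cases hjc
  | cons a tl ih =>
    rw [List.foldl_cons]
    have hsnd : (a.2 :: tl.map (fun p => p.2)).Nodup := by simpa using hnd
    rcases List.mem_cons.mp hjc with h | h
    · subst h
      refine (pvInner_preserve tl _ i r [r, jc.2] ?_).trans (PySem.Dict.get?_insert_self _ _ _)
      intro jc' hjc' hcon
      have h2 : jc.2 = jc'.2 := by
        have hc := hcon; simp only [List.cons.injEq, and_true] at hc; exact hc.2
      exact (List.nodup_cons.mp hsnd).1 (h2 ▸ List.mem_map.mpr ⟨jc', hjc', rfl⟩)
    · exact ih _ (List.nodup_cons.mp hsnd).2 h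

lemma pvOuter_preserve (l1 : List (Int × String)) (cols : List String)
    (d : PySem.Dict (List String) (Int × Int)) (k : List String)
    (hk : ∀ ir ∈ l1, ∀ jc ∈ PySem.List.enumerate cols, k ≠ [ir.2, jc.2]) :
    (l1.foldl (fun d ir => (PySem.List.enumerate cols).foldl
      (fun d jc => d.insert [ir.2, jc.2] (ir.1, jc.1)) d) d).get? k = d.get? k := by
  induction l1 generalizing d with
  | nil => rfl
  | cons a tl ih =>
    rw [List.foldl_cons, ih _ (fun ir h => hk ir (List.mem_cons_of_mem _ h)),
      pvInner_preserve _ _ _ _ _ (hk a List.mem_cons_self)]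

lemma pvOuter_get (l1 : List (Int × String)) (cols : List String)
    (d : PySem.Dict (List String) (Int × Int))
    (hnd1 : (l1.map (fun p => p.2)).Nodup) (hndC : cols.Nodup)
    (ir : Int × String) (hir : ir ∈ l1) (jc : Int × String)
    (hjc : jc ∈ PySem.List.enumerate cols) :
    (l1.foldl (fun d ir => (PySem.List.enumerate cols).foldl
      (fun d jc => d.insert [ir.2, jc.2] (ir.1, jc.1)) d) d).get? [ir.2, jc.2]
      = some (ir.1, jc.1) := by
  induction l1 generalizing d with
  | nil => cases hir
  | cons a tl ih =>
    rw [List.foldl_cons]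
    have hsnd : (a.2 :: tl.map (fun p => p.2)).Nodup := by simpa using hnd1
    rcases List.mem_cons.mp hir with h | h
    · subst h
      refine (pvOuter_preserve tl cols _ _ ?_).trans
        (pvInner_get _ _ _ _ (by rw [PySem.List.map_snd_enumerate]; exact hndC) jc hjc)
      intro ir' hir' jc' hjc' hcon
      have h2 : ir.2 = ir'.2 := by
        have hc := hcon; simp only [List.cons.injEq, and_true] at hc; exact hc.1
      exact (List.nodup_cons.mp hsnd).1 (h2 ▸ List.mem_map.mpr ⟨ir', hir', rfl⟩)
    · exact ih _ (List.nodup_cons.mp hsnd).2 h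

lemma pvInner_inv (l2 : List (Int × String)) (d : PySem.Dict (List String) (Int × Int))
    (i : Int) (r : String) (k : List String) (v : Int × Int)
    (h : (l2.foldl (fun d jc => d.insert [r, jc.2] (i, jc.1)) d).get? k = some v) :
    d.get? k = some v ∨ ∃ jc ∈ l2, k = [r, jc.2] ∧ v = (i, jc.1) := by
  induction l2 generalizing d with
  | nil => exact Or.inl h
  | cons a tl ih =>
    rw [List.foldl_cons] at h
    rcases ih _ h with h' | ⟨jc, hm, he⟩
    · by_cases hke : k = [r, a.2]
      · subst hke
        rw [PySem.Dict.get?_insert_self] at h'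
        exact Or.inr ⟨a, List.mem_cons_self, rfl, (Option.some.inj h').symm⟩
      · rw [PySem.Dict.get?_insert_of_ne _ _ hke] at h'
        exact Or.inl h'
    · exact Or.inr ⟨jc, List.mem_cons_of_mem _ hm, he⟩

lemma pvOuter_inv (l1 : List (Int × String)) (cols : List String)
    (d : PySem.Dict (List String) (Int × Int)) (k : List String) (v : Int × Int)
    (h : (l1.foldl (fun d ir => (PySem.List.enumerate cols).foldl
      (fun d jc => d.insert [ir.2, jc.2] (ir.1, jc.1)) d) d).get? k = some v) :
    d.get? k = some v ∨ ∃ ir ∈ l1, ∃ jc ∈ PySem.List.enumerate cols,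
      k = [ir.2, jc.2] ∧ v = (ir.1, jc.1) := by
  induction l1 generalizing d with
  | nil => exact Or.inl h
  | cons a tl ih =>
    rw [List.foldl_cons] at h
    rcases ih _ h with h' | ⟨ir, hm, rest⟩
    · rcases pvInner_inv _ _ _ _ _ _ h' with h'' | ⟨jc, hm2, he⟩
      · exact Or.inl h''
      · exact Or.inr ⟨a, List.mem_cons_self, jc, hm2, he⟩
    · exact Or.inr ⟨ir, List.mem_cons_of_mem _ hm, rest⟩

lemma pvMemEnumerate (xs : List String) (i : Nat) (h : i < xs.length) :
    ((i : Int), xs[i]) ∈ PySem.List.enumerate xs := by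
  have hlen : i < (PySem.List.enumerate xs 0).length := by
    rw [PySem.List.length_enumerate]; exact h
  have hg := PySem.List.getElem_enumerate xs 0 i hlen
  simp only [zero_add] at hg
  rw [← hg]
  exact List.getElem_mem hlen

lemma pvEnumerate_inv (xs : List String) (p : Int × String)
    (hp : p ∈ PySem.List.enumerate xs) :
    ∃ (i : Nat), ∃ (_ : i < xs.length), p = ((i : Int), xs[i]) := by
  obtain ⟨i, hi, hpe⟩ := List.mem_iff_getElem.mp hp
  have hlen : i < xs.length := by rwa [PySem.List.length_enumerate] at hi
  have hg := PySem.List.getElem_enumerate xs 0 i hi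
  simp only [zero_add] at hg
  exact ⟨i, hlen, by rw [← hpe, hg]⟩

-- the position index maps exactly the grid positions [rows[i], cols[j]] to (i, j)
lemma pvPosIndex_some (rows cols : List String) (i j : Nat)
    (hi : i < rows.length) (hj : j < cols.length)
    (hR : rows.Nodup) (hC : cols.Nodup) :
    (pvPosIndex rows cols).get? [rows[i], cols[j]] = some ((i : Int), (j : Int)) := by
  unfold pvPosIndex
  exact pvOuter_get (PySem.List.enumerate rows) cols PySem.Dict.empty
    (by rw [PySem.List.map_snd_enumerate]; exact hR) hC
    ((i : Int), rows[i]) (pvMemEnumerate rows i hi)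
    ((j : Int), cols[j]) (pvMemEnumerate cols j hj)

lemma pvPosIndex_inv (rows cols : List String) (k : List String) (v : Int × Int)
    (h : (pvPosIndex rows cols).get? k = some v) :
    ∃ (i j : Nat), ∃ (_ : i < rows.length), ∃ (_ : j < cols.length),
      k = [rows[i], cols[j]] ∧ v = ((i : Int), (j : Int)) := by
  unfold pvPosIndex at h
  rcases pvOuter_inv _ _ _ _ _ h with h' | ⟨ir, hir, jc, hjc, hk, hv⟩
  · rw [PySem.Dict.get?_empty] at h'
    simp at h'
  · obtain ⟨i, hi, hip⟩ := pvEnumerate_inv rows ir hir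
    obtain ⟨j, hj, hjp⟩ := pvEnumerate_inv cols jc hjc
    subst hip; subst hjp
    exact ⟨i, j, hi, hj, hk, hv⟩

-- cell reads of a single write
lemma pvCell_setCell_self (g : List (List Int)) (i j : Nat) (v : Int)
    (hi : i < g.length) (hj : j < (g[i]?.getD []).length) :
    pvCell (pvSetCell g (i : Int) (j : Int) v) i j = v := by
  have hgi : g[i]? = some (g[i]'hi) := List.getElem?_eq_getElem hi
  rw [hgi] at hj
  simp only [pvCell, pvSetCell, Int.toNat_natCast, List.getElem?_modify, hgi,
    Option.map_eq_map, Option.map_some, Option.getD_some, if_true]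
  rw [List.getD_eq_getElem?_getD, List.getElem?_set_self (by simpa using hj)]
  rfl

lemma pvCell_setCell_ne (g : List (List Int)) (i0 j0 i j : Nat) (v : Int)
    (h : i0 ≠ i ∨ j0 ≠ j) :
    pvCell (pvSetCell g (i0 : Int) (j0 : Int) v) i j = pvCell g i j := by
  simp only [pvCell, pvSetCell, Int.toNat_natCast, List.getElem?_modify, Option.map_eq_map]
  cases hgi : g[i]? with
  | none => rfl
  | some row =>
    simp only [Option.map_some, Option.getD_some]
    by_cases hii : i0 = i
    · subst hii
      rcases h with h | h
      · exact absurd rfl h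
      · rw [if_pos rfl, List.getD_eq_getElem?_getD, List.getD_eq_getElem?_getD,
          List.getElem?_set_ne h]
    · rw [if_neg hii]

-- scatter invariant
lemma pvScatter_cell (rows cols : List String) (hR : rows.Nodup) (hC : cols.Nodup)
    (t : List (List String × Int))
    (hnd : (t.map (fun p => p.1)).Nodup)
    (g : List (List Int)) (hg : g.length = rows.length)
    (hgr : ∀ (k : Nat), k < rows.length → (g[k]?.getD []).length = cols.length)
    (i j : Nat) (hi : i < rows.length) (hj : j < cols.length) :
    pvCell (t.foldl (fun grid p =>
      match (pvPosIndex rows cols).get? p.1 with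
      | some ij => pvSetCell grid ij.1 ij.2 p.2
      | none => grid) g) i j
      = ((PySem.Dict.mk t).get? [rows[i], cols[j]]).getD (pvCell g i j) := by
  induction t generalizing g with
  | nil => rfl
  | cons p t ih =>
    obtain ⟨key, v⟩ := p
    have hnd' := List.nodup_cons.mp (by simpa using hnd :
      (key :: t.map (fun p => p.1)).Nodup)
    cases hlook : (pvPosIndex rows cols).get? key with
    | none =>
      simp only [List.foldl_cons, hlook]
      rw [ih hnd'.2 g hg hgr, PySem.Dict.get?_mk_cons]
      have hbne : ((key : List String) == [rows[i], cols[j]]) = false := by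
        rw [beq_eq_false_iff_ne]
        intro hcon
        rw [hcon, pvPosIndex_some rows cols i j hi hj hR hC] at hlook
        simp at hlook
      rw [hbne]
      simp only [Bool.false_eq_true, if_false]
    | some ij =>
      obtain ⟨i0, j0, hi0, hj0, hkeq, hveq⟩ := pvPosIndex_inv rows cols key ij hlook
      subst hveq
      simp only [List.foldl_cons, hlook]
      have hshape := pvSetCell_shape g (i0 : Int) (j0 : Int) v
      rw [ih hnd'.2 _ (hshape.1.trans hg) (fun k hk => (hshape.2 k).trans (hgr k hk))]
      rw [PySem.Dict.get?_mk_cons]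
      subst hkeq
      by_cases hkeq2 : ([rows[i0], cols[j0]] : List String) = [rows[i], cols[j]]
      · have hc := hkeq2
        simp only [List.cons.injEq, and_true] at hc
        have hii : i0 = i := (List.Nodup.getElem_inj_iff hR).mp hc.1
        have hjj : j0 = j := (List.Nodup.getElem_inj_iff hC).mp hc.2
        have hnone : (PySem.Dict.mk t).get? [rows[i0], cols[j0]] = none := by
          rw [PySem.Dict.get?_eq_none_iff_not_mem_keys, PySem.Dict.keys_mk]
          exact hnd'.1
        rw [← hkeq2, hnone]
        simp only [beq_self_eq_true, if_true, Option.getD_some, Option.getD_none]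
        subst hii hjj
        exact pvCell_setCell_self g i0 j0 v (hg ▸ hi0) (by rw [hgr i0 hi0]; exact hj0)
      · have hbne : (([rows[i0], cols[j0]] : List String) == [rows[i], cols[j]]) = false := by
          simpa using hkeq2
        rw [hbne]
        simp only [Bool.false_eq_true, if_false]
        have hne : i0 ≠ i ∨ j0 ≠ j := by
          by_contra hcon
          push Not at hcon
          obtain ⟨h1, h2⟩ := hcon
          subst h1; subst h2
          exact hkeq2 rfl
        rw [pvCell_setCell_ne g i0 j0 i j v hne]

-- scatter preserves the grid shape
lemma pvScatter_shape (rows cols : List String)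
    (t : List (List String × Int)) (g : List (List Int)) :
    (t.foldl (fun grid p =>
      match (pvPosIndex rows cols).get? p.1 with
      | some ij => pvSetCell grid ij.1 ij.2 p.2
      | none => grid) g).length = g.length ∧
    ∀ (k : Nat), ((t.foldl (fun grid p =>
      match (pvPosIndex rows cols).get? p.1 with
      | some ij => pvSetCell grid ij.1 ij.2 p.2
      | none => grid) g)[(k : Nat)]?.getD []).length = (g[k]?.getD []).length := by
  induction t generalizing g with
  | nil => exact ⟨rfl, fun k => rfl⟩
  | cons p t ih =>
    cases hlook : (pvPosIndex rows cols).get? p.1 with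
    | none =>
      simp only [List.foldl_cons, hlook]
      exact ⟨(ih g).1, fun k => (ih g).2 k⟩
    | some ij =>
      simp only [List.foldl_cons, hlook]
      have hs := pvSetCell_shape g ij.1 ij.2 p.2
      exact ⟨(ih _).1.trans hs.1, fun k => ((ih _).2 k).trans (hs.2 k)⟩

-- characterisation of the shared header helpers
lemma pvRowHeaders_eq (table : List (List String × Int)) :
    pvGetRowHeaders table
      = PySem.List.sorted (PySem.Set.ofList ((table.map (fun p => p.1)).map
          (fun k => (PySem.List.pyGet? k 0).getD ""))) (fun x => x) false := by
  unfold pvGetRowHeaders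
  rw [PySem.Dict.keys_mk, PySem.Set.ofList_eq_foldl, List.map_map, List.foldl_map, List.foldl_map]
  rfl

lemma pvColHeaders_eq (table : List (List String × Int)) :
    pvGetColumnHeaders table
      = PySem.List.sorted (PySem.Set.ofList ((table.map (fun p => p.1)).map
          (fun k => (PySem.List.pyGet? k 1).getD ""))) (fun x => x) false := by
  unfold pvGetColumnHeaders
  rw [PySem.Dict.keys_mk, PySem.Set.ofList_eq_foldl, List.map_map, List.foldl_map, List.foldl_map]
  rfl

lemma pvRowHeaders_nodup (table : List (List String × Int)) :
    (pvGetRowHeaders table).Nodup := by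
  rw [pvRowHeaders_eq]
  exact ((PySem.List.sorted_perm _ _ _).nodup_iff).mpr (PySem.Set.nodup_ofList _)

lemma pvColHeaders_nodup (table : List (List String × Int)) :
    (pvGetColumnHeaders table).Nodup := by
  rw [pvColHeaders_eq]
  exact ((PySem.List.sorted_perm _ _ _).nodup_iff).mpr (PySem.Set.nodup_ofList _)

lemma pvCell_eq_getElem (g : List (List Int)) (i j : Nat)
    (h1 : i < g.length) (h2 : j < (g[i]'h1).length) :
    pvCell g i j = (g[i]'h1)[j]'h2 := by
  simp [pvCell, List.getElem?_eq_getElem h1, List.getD_eq_getElem?_getD,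
    List.getElem?_eq_getElem h2]

-- ===== VERDICT (by name: the statement is the Claim_ definition above) =====
theorem table_to_lists_spec : Claim_equal_table_to_lists := by
  intro table _ hpre
  obtain ⟨hnd, _⟩ := hpre
  unfold Spec_table_to_lists
  rw [pvA_eq_map]
  simp only [table_to_lists_alt]
  have hR := pvRowHeaders_nodup table
  have hC := pvColHeaders_nodup table
  have hg0k : ∀ (k : Nat), k < (pvGetRowHeaders table).length →
      ((((pvGetRowHeaders table).map
        (fun _ => List.replicate (pvGetColumnHeaders table).length (0 : Int)))[k]?.getD []).length
        = (pvGetColumnHeaders table).length) := by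
    intro k hk
    rw [List.getElem?_map, List.getElem?_eq_getElem hk]
    simp
  have hshape := pvScatter_shape (pvGetRowHeaders table) (pvGetColumnHeaders table) table
    ((pvGetRowHeaders table).map (fun _ => List.replicate (pvGetColumnHeaders table).length 0))
  have hBlen : (table.foldl (fun grid p =>
      match (pvPosIndex (pvGetRowHeaders table) (pvGetColumnHeaders table)).get? p.1 with
      | some ij => pvSetCell grid ij.1 ij.2 p.2
      | none => grid)
      ((pvGetRowHeaders table).map
        (fun _ => List.replicate (pvGetColumnHeaders table).length 0))).length
      = (pvGetRowHeaders table).length := by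
    rw [hshape.1, List.length_map]
  apply List.ext_getElem
  · rw [List.length_map, hBlen]
  · intro i h1 h2
    have hi : i < (pvGetRowHeaders table).length := by rwa [List.length_map] at h1
    apply List.ext_getElem
    · simp only [List.getElem_map, List.length_map]
      have hBinner := (hshape.2 i).trans (hg0k i hi)
      rw [List.getElem?_eq_getElem h2, Option.getD_some] at hBinner
      exact hBinner.symm
    · intro j hj1 hj2
      have hj : j < (pvGetColumnHeaders table).length := by
        simpa using hj1
      have hcell := pvScatter_cell (pvGetRowHeaders table) (pvGetColumnHeaders table) hR hC
        table hnd
        ((pvGetRowHeaders table).map (fun _ => List.replicate (pvGetColumnHeaders table).length 0))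
        (by rw [List.length_map]) hg0k i j hi hj
      rw [← pvCell_eq_getElem _ i j h2 hj2, hcell]
      have hcell0 : pvCell ((pvGetRowHeaders table).map
          (fun _ => List.replicate (pvGetColumnHeaders table).length (0 : Int))) i j = 0 := by
        unfold pvCell
        rw [List.getElem?_map, List.getElem?_eq_getElem hi, Option.map_some, Option.getD_some,
          List.getD_eq_getElem?_getD, List.getElem?_replicate]
        split <;> rfl
      rw [hcell0]
      simp [List.getElem_map]
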